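-- pv_equiv track=rewrite | github.com/Tony363/Dataquest-modules | client_homework/some_games.py | sum13
-- ===== SOURCE A (Python) =====
-- def sum13(nums):
--
--     total = 0
--     i = 0
--
--     while i < len(nums):
--         if nums[i] == 13:
--             i += 2
--             continue
--         total += nums[i]
--         i += 1
--
--     return total
-- ===== SOURCE B (Python) =====
-- def sum13(nums):
--     total = 0
--     skip = False
--     for x in nums:
--         if skip:
--             skip = False
--         elif x == 13:
--             skip = True
--         else:
--             total += x
--     return total
-- ===== Notes on version B (the rewrite author's own statement) =====
-- stated objective: idiomatic
-- what changed: Index-based while loop with i += 2 jumps replaced by a direct for-loop over the elements maintaining a boolean skip flag.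
import Mathlib
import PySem

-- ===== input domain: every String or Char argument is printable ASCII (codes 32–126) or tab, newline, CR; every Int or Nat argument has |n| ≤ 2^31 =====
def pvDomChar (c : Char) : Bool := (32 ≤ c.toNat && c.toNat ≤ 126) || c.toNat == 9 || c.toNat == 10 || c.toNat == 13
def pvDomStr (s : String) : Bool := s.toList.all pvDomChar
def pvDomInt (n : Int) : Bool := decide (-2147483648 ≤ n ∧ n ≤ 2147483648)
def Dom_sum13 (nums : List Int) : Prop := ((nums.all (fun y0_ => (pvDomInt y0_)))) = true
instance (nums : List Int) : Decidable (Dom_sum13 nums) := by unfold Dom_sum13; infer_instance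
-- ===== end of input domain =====

-- B replaces A's index-based while loop (with i += 2 jumps) by an idiomatic for-loop
-- over the elements maintaining a boolean skip flag; same O(n) cost.


-- ===== PORT A =====
-- the while loop: state (total, i); nums[i] is valid because the guard i < len holds
def sum13Loop (nums : List Int) (total : Int) (i : Nat) : Int :=
  if h : i < nums.length then
    if nums[i] = 13 then
      sum13Loop nums total (i + 2)
    else
      sum13Loop nums (total + nums[i]) (i + 1)
  else total
termination_by nums.length - i
decreasing_by all_goals omega

def sum13 (nums : List Int) : Int := sum13Loop nums 0 0

-- ===== PORT B =====
-- for-loop over the elements with accumulator (total, skip)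
def sum13_alt (nums : List Int) : Int :=
  (nums.foldl
    (fun (st : Int × Bool) x =>
      if st.2 then (st.1, false)
      else if x = 13 then (st.1, true)
      else (st.1 + x, false))
    (0, false)).1

-- ===== PRECONDITION & SPEC =====
def Spec_sum13 (nums : List Int) (out : Int) : Prop := out = sum13_alt nums
instance (nums : List Int) (out : Int) : Decidable (Spec_sum13 nums out) := by unfold Spec_sum13; infer_instance

-- ===== CLAIM (what is proved, stated in full; the proofs are below) =====
def Claim_equal_sum13 : Prop := ∀ (nums : List Int), Dom_sum13 nums → Spec_sum13 nums (sum13 nums)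

-- ===== LEMMAS AND PROOFS =====

-- reference function: the skip-after-13 sum, by structural recursion
def gsum : List Int → Int
  | [] => 0
  | [x] => if x = 13 then 0 else x
  | x :: y :: ys => if x = 13 then gsum ys else x + gsum (y :: ys)

theorem gsum_cons_ne (x : Int) (xs : List Int) (h : x ≠ 13) :
    gsum (x :: xs) = x + gsum xs := by
  cases xs <;> simp [gsum, h]

theorem gsum_13_cons (y : Int) (ys : List Int) : gsum (13 :: y :: ys) = gsum ys := by
  simp [gsum]

theorem sum13Loop_eq (nums : List Int) (total : Int) (i : Nat) :
    sum13Loop nums total i = total + gsum (nums.drop i) := by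
  rw [sum13Loop]
  split
  · next h =>
    have hd : nums.drop i = nums[i] :: nums.drop (i + 1) :=
      (List.getElem_cons_drop h).symm
    split
    · next h13 =>
      rw [sum13Loop_eq nums total (i + 2), hd, h13]
      by_cases h1 : i + 1 < nums.length
      · have hd1 : nums.drop (i + 1) = nums[i + 1] :: nums.drop (i + 2) :=
          (List.getElem_cons_drop h1).symm
        rw [hd1, gsum_13_cons]
      · have e1 : nums.drop (i + 1) = [] := List.drop_eq_nil_of_le (by omega)
        have e2 : nums.drop (i + 2) = [] := List.drop_eq_nil_of_le (by omega)
        rw [e1, e2]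
        simp [gsum]
    · next h13 =>
      rw [sum13Loop_eq nums (total + nums[i]) (i + 1), hd, gsum_cons_ne _ _ h13]
      ring
  · next h =>
    rw [List.drop_eq_nil_of_le (by omega)]
    simp [gsum]
termination_by nums.length - i
decreasing_by all_goals omega

-- B's fold equals gsum, simultaneously for both flag states
theorem fold_eq (xs : List Int) : ∀ t : Int,
    (xs.foldl
      (fun (st : Int × Bool) x =>
        if st.2 then (st.1, false)
        else if x = 13 then (st.1, true)
        else (st.1 + x, false))
      (t, false)).1 = t + gsum xs
    ∧
    (xs.foldl
      (fun (st : Int × Bool) x =>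
        if st.2 then (st.1, false)
        else if x = 13 then (st.1, true)
        else (st.1 + x, false))
      (t, true)).1 = t + gsum (13 :: xs) := by
  induction xs with
  | nil => intro t; simp [gsum]
  | cons x xs ih =>
    intro t
    refine ⟨?_, ?_⟩
    · by_cases h : x = 13
      · subst h
        simpa using (ih t).2
      · rw [gsum_cons_ne _ _ h]
        simpa [h, add_assoc] using (ih (t + x)).1
    · rw [gsum_13_cons]
      simpa using (ih t).1

-- ===== VERDICT (by name: the statement is the Claim_ definition above) =====
theorem sum13_spec : Claim_equal_sum13 := by
  intro nums _
  unfold Spec_sum13 sum13 sum13_alt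
  rw [sum13Loop_eq]
  simpa using ((fold_eq nums 0).1).symm
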